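-- pv_equiv track=rewrite | github.com/JDSanchz/MLSoccerMode | main.py | suggest_bench_positions
-- ===== SOURCE A (Python) =====
-- def suggest_bench_positions(formation, size):
--     pools = {
--         "4-3-3": ["GK","CB","LB","RB","CM","CM","LW","RW","ST"],
--         "4-4-2": ["GK","CB","LB","RB","CDM","CAM","LW","RW","ST"],
--     }
--     base = pools[formation]
--     out = []
--     i = 0
--     while len(out) < size:
--         out.append(base[i % len(base)])
--         i += 1
--     return out
-- ===== SOURCE B (Python) =====
-- def suggest_bench_positions(formation, size):
--     pools = {
--         "4-3-3": ["GK","CB","LB","RB","CM","CM","LW","RW","ST"],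
--         "4-4-2": ["GK","CB","LB","RB","CDM","CAM","LW","RW","ST"],
--     }
--     base = pools[formation]
--     if size <= 0:
--         return []
--     q, r = divmod(size, len(base))
--     return base * q + base[:r]
-- ===== Notes on version B (the rewrite author's own statement) =====
-- stated objective: simpler
-- what changed: replaces the element-by-element while loop with arithmetic: divmod(size, len(base)) then whole-list repetition plus one partial slice
import Mathlib
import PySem

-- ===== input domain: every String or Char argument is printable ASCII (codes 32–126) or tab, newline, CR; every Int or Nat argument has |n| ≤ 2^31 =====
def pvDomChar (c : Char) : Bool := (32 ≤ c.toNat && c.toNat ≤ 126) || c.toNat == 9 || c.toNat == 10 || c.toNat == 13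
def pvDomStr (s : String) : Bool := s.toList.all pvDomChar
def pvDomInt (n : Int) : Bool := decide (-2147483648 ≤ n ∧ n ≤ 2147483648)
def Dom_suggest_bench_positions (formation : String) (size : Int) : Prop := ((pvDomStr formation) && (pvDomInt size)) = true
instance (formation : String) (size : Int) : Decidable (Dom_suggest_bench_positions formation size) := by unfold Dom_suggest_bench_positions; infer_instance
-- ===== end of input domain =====

-- B builds the answer by divmod + whole-list repetition + one slice instead of A's element-by-element
-- while loop; equal on all formations the pools dict contains (Pre_), any integer size.

-- ===== PORT A =====
-- the pools dict lookup: first (only) matching key; [] stands for the KeyError case, excluded by Pre_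
def pvPoolGet (formation : String) : List String :=
  if formation = "4-3-3" then ["GK","CB","LB","RB","CM","CM","LW","RW","ST"]
  else if formation = "4-4-2" then ["GK","CB","LB","RB","CDM","CAM","LW","RW","ST"]
  else []

-- the while loop: out.append(base[i % len(base)]); i += 1.  Under Pre_ base is nonempty, so
-- i % len(base) is in range and getD "" is exact there.
def pvALoop (base : List String) (size : Int) (out : List String) (i : Nat) : List String :=
  if (out.length : Int) < size then
    pvALoop base size (out ++ [base.getD (i % base.length) ""]) (i + 1)
  else out
termination_by (size - out.length).toNat
decreasing_by simp; omega

def suggest_bench_positions (formation : String) (size : Int) : List String :=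
  pvALoop (pvPoolGet formation) size [] 0

-- ===== PORT B =====
def suggest_bench_positions_alt (formation : String) (size : Int) : List String :=
  let base := pvPoolGet formation
  if size ≤ 0 then []
  else
    let q := PySem.Int.floordiv size (base.length : Int)
    let r := PySem.Int.mod size (base.length : Int)
    (List.replicate q.toNat base).flatten ++ base.take r.toNat

-- ===== PRECONDITION & SPEC =====
-- Pre_ excludes formations not in the pools dict, on which A raises KeyError.
def Pre_suggest_bench_positions (formation : String) (size : Int) : Prop :=
  formation = "4-3-3" ∨ formation = "4-4-2"
instance (formation : String) (size : Int) : Decidable (Pre_suggest_bench_positions formation size) := by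
  unfold Pre_suggest_bench_positions; infer_instance

def pvWitness_suggest_bench_positions : String × Int := ("4-3-3", 5)

def Spec_suggest_bench_positions (formation : String) (size : Int) (out : List String) : Prop := out = suggest_bench_positions_alt formation size
instance (formation : String) (size : Int) (out : List String) : Decidable (Spec_suggest_bench_positions formation size out) := by unfold Spec_suggest_bench_positions; infer_instance

-- ===== CLAIM (what is proved, stated in full; the proofs are below) =====
def Claim_equal_suggest_bench_positions : Prop := ∀ (formation : String) (size : Int), Dom_suggest_bench_positions formation size → Pre_suggest_bench_positions formation size → Spec_suggest_bench_positions formation size (suggest_bench_positions formation size)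

-- ===== LEMMAS AND PROOFS =====

-- the loop unrolled: it appends base[(i+k) % L] for k < n, n the remaining count
theorem pvALoop_eq (base : List String) (size : Int) :
    ∀ (n : Nat) (out : List String) (i : Nat), (size - out.length).toNat = n →
    pvALoop base size out i
      = out ++ (List.range n).map (fun k => base.getD ((i + k) % base.length) "") := by
  intro n
  induction n with
  | zero =>
    intro out i h
    unfold pvALoop
    rw [if_neg (by omega)]
    simp
  | succ m ih =>
    intro out i h
    unfold pvALoop
    rw [if_pos (by omega)]
    rw [ih (out ++ [base.getD (i % base.length) ""]) (i + 1) (by simp; omega)]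
    rw [List.range_succ_eq_map]
    simp [Function.comp_def, Nat.succ_eq_add_one]
    intro a _
    have hidx : i + 1 + a = i + (a + 1) := by omega
    rw [hidx]

-- the first full block: base itself, element by element
theorem pvBlock_eq (base : List String) :
    (List.range base.length).map (fun k => base.getD (k % base.length) "") = base := by
  apply List.ext_getElem
  · simp
  · intro j h1 h2
    simp at h1
    simp [List.getD_eq_getElem?_getD, Nat.mod_eq_of_lt h1, List.getElem?_eq_getElem h2]

-- q full copies plus a take-r slice equal the unrolled cycle of length q*L + r
theorem pvRepTake (base : List String) (hb : base ≠ []) :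
    ∀ (q r : Nat), r ≤ base.length →
    (List.replicate q base).flatten ++ base.take r
      = (List.range (q * base.length + r)).map (fun k => base.getD (k % base.length) "") := by
  intro q
  induction q with
  | zero =>
    intro r hr
    simp only [List.replicate, List.flatten_nil, List.nil_append, Nat.zero_mul, Nat.zero_add]
    apply List.ext_getElem
    · simp; omega
    · intro j h1 h2
      simp at h1 h2
      have hj : j < base.length := by omega
      simp [List.getD_eq_getElem?_getD, Nat.mod_eq_of_lt hj, List.getElem?_eq_getElem hj]
  | succ q ih =>
    intro r hr
    have harith : (q + 1) * base.length + r = base.length + (q * base.length + r) := by ring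
    rw [harith, List.range_add, List.map_append]
    rw [List.replicate_succ, List.flatten_cons, List.append_assoc, ih r hr]
    congr 1
    · exact (pvBlock_eq base).symm
    · rw [List.map_map]
      apply List.map_congr_left
      intro k _
      simp [Nat.add_mod_left]

-- the bridge: the loop equals B's divmod construction, for any nonempty base
theorem pvBridge (base : List String) (hb : base ≠ []) (size : Int) :
    pvALoop base size [] 0
      = if size ≤ 0 then []
        else (List.replicate (PySem.Int.floordiv size (base.length : Int)).toNat base).flatten
              ++ base.take (PySem.Int.mod size (base.length : Int)).toNat := by
  have hL : 0 < base.length := List.length_pos_iff.mpr hb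
  by_cases hsz : size ≤ 0
  · rw [if_pos hsz, pvALoop_eq base size 0 [] 0 (by simp; omega)]
    simp
  · rw [if_neg hsz, pvALoop_eq base size size.toNat [] 0 (by simp)]
    have hLZ : (0 : Int) < (base.length : Int) := by exact_mod_cast hL
    rw [PySem.Int.floordiv_eq_ediv_of_pos hLZ, PySem.Int.mod_eq_emod_of_pos hLZ]
    set q : Int := size / (base.length : Int) with hq
    set r : Int := size % (base.length : Int) with hr
    have hqn : 0 ≤ q := Int.ediv_nonneg (by omega) (le_of_lt hLZ)
    have hrn : 0 ≤ r := Int.emod_nonneg size (by omega)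
    have hrl : r < (base.length : Int) := Int.emod_lt_of_pos size hLZ
    have hsum : (base.length : Int) * q + r = size := Int.mul_ediv_add_emod size (base.length : Int)
    have hsum' : q.toNat * base.length + r.toNat = size.toNat := by
      have : ((q.toNat * base.length + r.toNat : Nat) : Int) = (size.toNat : Int) := by
        push_cast
        rw [Int.toNat_of_nonneg hqn, Int.toNat_of_nonneg hrn,
          Int.toNat_of_nonneg (by omega : (0:Int) ≤ size)]
        linarith [hsum]
      exact_mod_cast this
    rw [pvRepTake base hb q.toNat r.toNat (by omega), hsum']
    simp

-- ===== VERDICT (by name: the statement is the Claim_ definition above) =====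
theorem suggest_bench_positions_spec : Claim_equal_suggest_bench_positions := by
  intro formation size _ hpre
  unfold Spec_suggest_bench_positions suggest_bench_positions suggest_bench_positions_alt
  have hb : pvPoolGet formation ≠ [] := by
    rcases hpre with h | h <;> subst h <;> simp [pvPoolGet]
  exact pvBridge (pvPoolGet formation) hb size
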